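-- pv_equiv track=rewrite | github.com/BryceByeongchan/psi-skills | skills/psi-qe-input-validator/qe_input_validator.py | _is_in_comment
-- ===== SOURCE A (Python) =====
-- def _is_in_comment(text_before: str) -> bool:
--     """Check if there is an unquoted '!' before the current position."""
--     in_quote = False
--     qchar = ""
--     for c in text_before:
--         if in_quote:
--             if c == qchar:
--                 in_quote = False
--         elif c in ("'", '"'):
--             in_quote = True
--             qchar = c
--         elif c == "!":
--             return True
--     return False
-- ===== SOURCE B (Python) =====
-- def _is_in_comment(text_before: str) -> bool:
--     """Check if there is an unquoted '!' before the current position."""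
--     cleaned = []
--     i = 0
--     n = len(text_before)
--     while i < n:
--         c = text_before[i]
--         if c == "'" or c == '"':
--             j = text_before.find(c, i + 1)
--             i = n if j == -1 else j + 1
--         else:
--             cleaned.append(c)
--             i += 1
--     return "!" in "".join(cleaned)
-- ===== Notes on version B (the rewrite author's own statement) =====
-- stated objective: alternative
-- what changed: Replaces A's guarded character-by-character quote state machine (with early return on '!') by a remove-then-search pass: strip each quoted span by jumping to its matching closing quote with str.find (an unterminated quote swallows the rest), then test '!' membership in the cleaned text.
import Mathlib
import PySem

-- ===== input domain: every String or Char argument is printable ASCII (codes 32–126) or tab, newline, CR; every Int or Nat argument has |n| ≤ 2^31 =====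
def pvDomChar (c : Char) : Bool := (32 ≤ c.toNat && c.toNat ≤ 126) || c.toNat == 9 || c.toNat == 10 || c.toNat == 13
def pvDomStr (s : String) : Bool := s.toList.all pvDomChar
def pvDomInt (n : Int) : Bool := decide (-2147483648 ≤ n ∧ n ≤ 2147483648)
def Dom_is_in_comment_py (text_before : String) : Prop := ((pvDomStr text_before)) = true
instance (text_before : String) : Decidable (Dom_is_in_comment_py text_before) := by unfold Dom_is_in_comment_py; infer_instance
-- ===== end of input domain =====

-- B strips quoted spans first (jumping to each closing quote) and then tests '!'-membership,
-- instead of A's guarded character-by-character state machine; alternative decomposition, same cost.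

-- ===== PORT A =====
-- the for-loop of _is_in_comment, state (in_quote, qchar); early return True on an unquoted '!'
def pvLoopA : List Char → Bool → String → Bool
  | [], _, _ => false
  | c :: rest, in_quote, qchar =>
    if in_quote then
      if String.mk [c] = qchar then pvLoopA rest false qchar
      else pvLoopA rest true qchar
    else if c = '\'' ∨ c = '"' then pvLoopA rest true (String.mk [c])
    else if c = '!' then true
    else pvLoopA rest in_quote qchar

def is_in_comment_py (text_before : String) : Bool :=
  pvLoopA text_before.toList false ""

-- ===== PORT B =====
-- Source B's while-loop: on a quote, find the matching quote (dropWhile = str.find) and jump past it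
-- (or to the end if none); otherwise keep the character.  Builds `cleaned`.
def pvStripQ : List Char → List Char
  | [] => []
  | c :: rest =>
    if c = '\'' ∨ c = '"' then
      pvStripQ ((rest.dropWhile (· ≠ c)).drop 1)
    else
      c :: pvStripQ rest
termination_by cs => cs.length
decreasing_by
  · simp only [List.length_cons]
    have := List.length_dropWhile_le (fun x => decide (x ≠ c)) rest
    have : (List.drop 1 (rest.dropWhile (· ≠ c))).length ≤ (rest.dropWhile (· ≠ c)).length := by simp
    omega
  · simp

def is_in_comment_py_alt (text_before : String) : Bool :=
  (pvStripQ text_before.toList).contains '!'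

-- ===== PRECONDITION & SPEC =====
def Spec_is_in_comment_py (text_before : String) (out : Bool) : Prop := out = is_in_comment_py_alt text_before
instance (text_before : String) (out : Bool) : Decidable (Spec_is_in_comment_py text_before out) := by unfold Spec_is_in_comment_py; infer_instance

-- ===== CLAIM (what is proved, stated in full; the proofs are below) =====
def Claim_equal_is_in_comment_py : Prop := ∀ (text_before : String), Dom_is_in_comment_py text_before → Spec_is_in_comment_py text_before (is_in_comment_py text_before)

-- ===== LEMMAS AND PROOFS =====

-- ===== VERDICT (by name: the statement is the Claim_ definition above) =====
-- pvLoopA agrees with strip-then-search, both out of a quote (any stale qchar) and inside one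
lemma pvKey : ∀ (n : Nat) (cs : List Char), cs.length ≤ n →
    (∀ q, pvLoopA cs false q = (pvStripQ cs).contains '!') ∧
    (∀ qc : Char, pvLoopA cs true (String.mk [qc]) =
      (pvStripQ ((cs.dropWhile (· ≠ qc)).drop 1)).contains '!') := by
  intro n
  induction n with
  | zero =>
    intro cs h
    have : cs = [] := List.eq_nil_of_length_eq_zero (Nat.le_zero.mp h)
    subst this
    exact ⟨fun q => by simp [pvLoopA, pvStripQ], fun qc => by simp [pvLoopA, pvStripQ]⟩
  | succ n ih =>
    intro cs h
    match cs with
    | [] => exact ⟨fun q => by simp [pvLoopA, pvStripQ], fun qc => by simp [pvLoopA, pvStripQ]⟩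
    | c :: rest =>
      have hr : rest.length ≤ n := by simpa using Nat.succ_le_succ_iff.mp (by simpa using h)
      have ihr := ih rest hr
      refine ⟨fun q => ?_, fun qc => ?_⟩
      · by_cases hc : c = '\'' ∨ c = '"'
        · simp only [pvLoopA, pvStripQ, hc]
          simp only [if_true]
          exact ihr.2 c
        · by_cases hb : c = '!'
          · subst hb
            simp [pvLoopA, pvStripQ]
          · have hb' : ('!' : Char) ≠ c := fun h' => hb h'.symm
            simp [pvLoopA, pvStripQ, hc, hb, hb', ihr.1 q]
      · by_cases hq : c = qc
        · subst hq
          simp only [pvLoopA, if_true, List.dropWhile_cons]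
          simp only [ne_eq, not_true_eq_false, decide_false, Bool.false_eq_true, if_false,
            List.drop_succ_cons, List.drop_zero]
          exact ihr.1 _
        · have hmk : ¬ (String.mk [c] = String.mk [qc]) :=
            fun h' => hq (by simpa using String.ofList_injective h')
          simp only [pvLoopA, if_neg hmk, if_true, List.dropWhile_cons]
          simp only [ne_eq, hq, not_false_eq_true, decide_true, if_true]
          exact ihr.2 qc

theorem is_in_comment_py_spec : Claim_equal_is_in_comment_py := by
  intro s _
  unfold Spec_is_in_comment_py is_in_comment_py is_in_comment_py_alt
  exact (pvKey s.toList.length s.toList le_rfl).1 ""
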